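-- pv_equiv track=rewrite | github.com/zoubohao/UC_Davis_STA_CS_Coureses | ECS 32B/HW3/prog3.py | foo
-- ===== SOURCE A (Python) =====
-- def foo(val1: list, val2: list):
--     if len(val1) != len(val2):
--         raise ValueError("The given lists have different lengths.")
--     if len(val1) == 0 and len(val2) == 0:
--         return True
--     elif (val1[0] + val2[0]) != 10:
--         return False
--     else:
--         return foo(val1[1:], val2[1:])
-- ===== SOURCE B (Python) =====
-- def foo(val1: list, val2: list):
--     if len(val1) != len(val2):
--         raise ValueError("The given lists have different lengths.")
--     return all(a + b == 10 for a, b in zip(val1, val2))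
-- ===== Notes on version B (the rewrite author's own statement) =====
-- stated objective: idiomatic
-- what changed: Replaced the head-and-slice recursion with a single all(...) over zip(val1, val2), keeping the length-mismatch ValueError guard.
import Mathlib
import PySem

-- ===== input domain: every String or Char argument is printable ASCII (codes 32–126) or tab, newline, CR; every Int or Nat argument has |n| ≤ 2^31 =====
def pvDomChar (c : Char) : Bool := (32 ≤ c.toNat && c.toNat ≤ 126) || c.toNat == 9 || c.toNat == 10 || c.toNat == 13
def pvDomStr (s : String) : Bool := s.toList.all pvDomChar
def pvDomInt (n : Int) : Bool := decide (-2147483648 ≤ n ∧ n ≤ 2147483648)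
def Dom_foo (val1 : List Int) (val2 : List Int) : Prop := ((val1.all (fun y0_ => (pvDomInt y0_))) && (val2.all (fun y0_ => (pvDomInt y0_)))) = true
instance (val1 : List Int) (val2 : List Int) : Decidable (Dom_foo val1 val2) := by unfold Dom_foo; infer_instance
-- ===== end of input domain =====

-- B replaces A's head-and-slice recursion with one all(...) over zip; same ValueError guard (idiomatic).

-- ===== PORT A =====
-- A raises ValueError when the lengths differ; that branch is excluded by Pre_foo, the port returns false there.
def foo (val1 : List Int) (val2 : List Int) : Bool :=
  if val1.length ≠ val2.length then false   -- raise ValueError (outside Pre_foo)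
  else if val1.length = 0 ∧ val2.length = 0 then true
  else if (val1.headI + val2.headI) ≠ 10 then false
  else foo (val1.drop 1) (val2.drop 1)
termination_by val1.length
decreasing_by
  simp only [List.length_drop]
  omega

-- ===== PORT B =====
def foo_alt (val1 : List Int) (val2 : List Int) : Bool :=
  if val1.length ≠ val2.length then false   -- raise ValueError (outside Pre_foo)
  else (val1.zip val2).all (fun p => p.1 + p.2 == 10)

-- ===== PRECONDITION & SPEC =====
-- A raises ValueError exactly when the lists' lengths differ; those inputs are excluded.
def Pre_foo (val1 : List Int) (val2 : List Int) : Prop := val1.length = val2.length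
instance (val1 : List Int) (val2 : List Int) : Decidable (Pre_foo val1 val2) := by unfold Pre_foo; infer_instance
def pvWitness_foo : List Int × List Int := ([3, 4], [7, 6])

def Spec_foo (val1 : List Int) (val2 : List Int) (out : Bool) : Prop := out = foo_alt val1 val2
instance (val1 : List Int) (val2 : List Int) (out : Bool) : Decidable (Spec_foo val1 val2 out) := by unfold Spec_foo; infer_instance

-- ===== CLAIM =====
def Claim_equal_foo : Prop := ∀ (val1 : List Int) (val2 : List Int), Dom_foo val1 val2 → Pre_foo val1 val2 → Spec_foo val1 val2 (foo val1 val2)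

-- ===== LEMMAS AND PROOFS =====
theorem foo_eq_alt : ∀ (val1 val2 : List Int), val1.length = val2.length → foo val1 val2 = foo_alt val1 val2 := by
  intro val1
  induction val1 with
  | nil =>
    intro val2 h
    cases val2 with
    | nil => unfold foo foo_alt; simp
    | cons b bs => simp at h
  | cons a as ih =>
    intro val2 h
    cases val2 with
    | nil => simp at h
    | cons b bs =>
      simp at h
      unfold foo foo_alt
      simp [h]
      by_cases hb : a + b = 10
      · simp [hb]
        have := ih bs h
        unfold foo_alt at this
        simp [h] at this
        exact this
      · simp [hb]

-- ===== VERDICT =====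
theorem foo_spec : Claim_equal_foo := by
  intro val1 val2 _ hpre
  exact foo_eq_alt val1 val2 hpre
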